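-- pv_equiv track=rewrite | github.com/kamilGie/ASRT-WDI | Kolokwia/Kolokwium_Poprawkowe/2023_5B/Rozwiązania/main.py | thirteen
-- ===== SOURCE A (Python) =====
-- def pole(proste) -> int:
--     return (proste[1] - proste[0]) ** 2
--
-- def nachodza(k1, k2) -> bool:
--     """Nachodzenie zachodzi, jeśli kwadrat nie leży całkowicie po lewej, prawej, poniżej lub powyżej drugiego."""
--     lewo = k1[1] <= k2[0]
--     prawo = k1[0] >= k2[1]
--     dol = k1[3] <= k2[2]
--     gora = k1[2] >= k2[3]
--
--     return not (lewo or prawo or dol or gora)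
--
-- def thirteen(T):
--     wymagana_liczba_kwadratow = 13
--     wymagane_pole_kwadratow = 2024
--
--     def rek(idx=0, szukane_pole=wymagane_pole_kwadratow, kwadraty=[]):
--
--         # Zwracamy True, jeśli na liście znajduje się 13 kwadratów, a `szukane_pole` wynosi 0.
--         if len(kwadraty) == wymagana_liczba_kwadratow and szukane_pole == 0:
--             return True
--
--         # Zwracamy False, jeśli doszliśmy do końca listy kwadratów, lista kwadratów jest za duża lub suma pól przekroczyła 0.
--         if ( idx == len(T) or len(kwadraty) > wymagana_liczba_kwadratow or szukane_pole < 0):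
--             return False
--
--         # Jeśli kwadrat nie nachodzi na żaden z kwadratów w tej liście,
--         if not any(nachodza(T[idx], kwadrat) for kwadrat in kwadraty):
--             # sprawdzamy, czy funkcja, dodając go do listy oraz zmniejszając szukane pole o pole tego kwadratu zwroci true
--             if rek(idx + 1, szukane_pole - pole(T[idx]), kwadraty + [T[idx]]):
--                 return True
--
--         return rek(idx + 1, szukane_pole, kwadraty)
--
--     return rek()
-- ===== SOURCE B (Python) =====
-- def pole(proste) -> int:
--     return (proste[1] - proste[0]) ** 2
--
-- def nachodza(k1, k2) -> bool:
--     lewo = k1[1] <= k2[0]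
--     prawo = k1[0] >= k2[1]
--     dol = k1[3] <= k2[2]
--     gora = k1[2] >= k2[3]
--     return not (lewo or prawo or dol or gora)
--
-- def thirteen(T):
--     # iterative DFS with an explicit stack of (index, remaining area, chosen squares)
--     n = len(T)
--     stack = [(0, 2024, [])]
--     while stack:
--         idx, rem, chosen = stack.pop()
--         if len(chosen) == 13 and rem == 0:
--             return True
--         if idx >= n or len(chosen) > 13 or rem < 0:
--             continue
--         t = T[idx]
--         stack.append((idx + 1, rem, chosen))  # skip T[idx]
--         if not any(nachodza(t, k) for k in chosen):
--             stack.append((idx + 1, rem - pole(t), chosen + [t]))  # take T[idx] (explored first)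
--     return False
-- ===== Notes on version B (the rewrite author's own statement) =====
-- stated objective: alternative
-- what changed: Replaces A's recursive take/skip backtracking (nested closure with implicit call-stack state) by an iterative depth-first search driven by an explicit stack of (index, remaining-area, chosen-squares) frames, so B uses no recursion at all.
import Mathlib
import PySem

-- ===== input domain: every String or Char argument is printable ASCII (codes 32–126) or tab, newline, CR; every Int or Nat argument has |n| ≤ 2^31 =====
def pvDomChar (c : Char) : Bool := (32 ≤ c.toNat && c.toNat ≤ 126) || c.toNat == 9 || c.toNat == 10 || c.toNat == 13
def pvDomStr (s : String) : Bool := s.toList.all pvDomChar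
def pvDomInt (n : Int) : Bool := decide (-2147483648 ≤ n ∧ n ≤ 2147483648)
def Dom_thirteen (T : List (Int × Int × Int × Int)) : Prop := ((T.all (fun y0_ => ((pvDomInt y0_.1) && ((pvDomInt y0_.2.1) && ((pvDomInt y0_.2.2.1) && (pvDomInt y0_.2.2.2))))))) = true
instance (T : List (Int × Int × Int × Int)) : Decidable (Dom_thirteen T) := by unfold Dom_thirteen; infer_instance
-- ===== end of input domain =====

-- B replaces A's recursive take/skip backtracking by an iterative depth-first search over an
-- explicit stack of (index, remaining area, chosen squares) frames (objective: alternative).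

-- ===== PORT A =====
def pole (proste : Int × Int × Int × Int) : Int :=
  (proste.2.1 - proste.1) ^ 2

def nachodza (k1 k2 : Int × Int × Int × Int) : Bool :=
  let lewo  := decide (k1.2.1 ≤ k2.1)
  let prawo := decide (k1.1 ≥ k2.2.1)
  let dol   := decide (k1.2.2.2 ≤ k2.2.2.1)
  let gora  := decide (k1.2.2.1 ≥ k2.2.2.2)
  !(lewo || prawo || dol || gora)

-- A's inner `rek`, structurally recursive on the not-yet-inspected suffix T[idx:];
-- `idx == len(T)` is the `[]` case (A tests that guard before indexing T[idx]).
def thirteenRek (rest : List (Int × Int × Int × Int)) (szukane : Int)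
    (kwadraty : List (Int × Int × Int × Int)) : Bool :=
  if kwadraty.length = 13 ∧ szukane = 0 then true
  else
    match rest with
    | [] => false
    | t :: rs =>
      if 13 < kwadraty.length ∨ szukane < 0 then false
      else if (!kwadraty.any (fun kwadrat => nachodza t kwadrat))
              && thirteenRek rs (szukane - pole t) (kwadraty ++ [t]) then true
      else thirteenRek rs szukane kwadraty

def thirteen (T : List (Int × Int × Int × Int)) : Bool :=
  thirteenRek T 2024 []

-- ===== PORT B =====
-- termination measure for the stack loop: each frame (idx, _, _) weighs 3^(n - idx)
def pvMeasure (n : Nat) (stack : List (Nat × Int × List (Int × Int × Int × Int))) : Nat :=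
  (stack.map (fun f => 3 ^ (n - f.1))).sum

theorem pvMeasure_step (n idx : Nat) (h : idx < n) : 2 * 3 ^ (n - (idx + 1)) < 3 ^ (n - idx) := by
  have : n - idx = (n - (idx + 1)) + 1 := by omega
  rw [this, pow_succ]
  have hp : 0 < 3 ^ (n - (idx + 1)) := Nat.pow_pos (by norm_num)
  omega

-- the while-loop of Source B; the list head is the top of Python's stack, so a frame pushed
-- last is popped first (Source B pushes skip, then take, and pops take first).
def thirteenLoop (T : List (Int × Int × Int × Int))
    (stack : List (Nat × Int × List (Int × Int × Int × Int))) : Bool :=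
  match stack with
  | [] => false
  | (idx, rem, chosen) :: rest =>
    if chosen.length = 13 ∧ rem = 0 then true
    else if T.length ≤ idx ∨ 13 < chosen.length ∨ rem < 0 then thirteenLoop T rest
    else
      thirteenLoop T
        (let t := T.getD idx (0, 0, 0, 0)   -- Source B's T[idx]; exact: the guard gives idx < len(T)
         if !chosen.any (fun k => nachodza t k) then
           (idx + 1, rem - pole t, chosen ++ [t]) :: (idx + 1, rem, chosen) :: rest
         else
           (idx + 1, rem, chosen) :: rest)
  termination_by pvMeasure T.length stack
  decreasing_by
  · simp only [pvMeasure, List.map_cons, List.sum_cons]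
    have : 0 < 3 ^ (T.length - idx) := Nat.pow_pos (by norm_num)
    omega
  · have hlt : idx < T.length := by omega
    have hs := pvMeasure_step T.length idx hlt
    split
    · simp only [pvMeasure, List.map_cons, List.sum_cons]; omega
    · simp only [pvMeasure, List.map_cons, List.sum_cons]; omega

def thirteen_alt (T : List (Int × Int × Int × Int)) : Bool :=
  thirteenLoop T [(0, 2024, [])]


-- ===== PRECONDITION & SPEC =====
def Spec_thirteen (T : List (Int × Int × Int × Int)) (out : Bool) : Prop := out = thirteen_alt T
instance (T : List (Int × Int × Int × Int)) (out : Bool) : Decidable (Spec_thirteen T out) := by unfold Spec_thirteen; infer_instance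

-- ===== CLAIM (what is proved, stated in full; the proofs are below) =====
def Claim_equal_thirteen : Prop := ∀ (T : List (Int × Int × Int × Int)), Dom_thirteen T → Spec_thirteen T (thirteen T)

-- ===== LEMMAS AND PROOFS =====

-- the loop returns true iff the depth-first search of some stacked frame (= A's rek run on
-- the corresponding suffix of T) returns true
theorem thirteenLoop_eq_any (T : List (Int × Int × Int × Int))
    (stack : List (Nat × Int × List (Int × Int × Int × Int))) :
    thirteenLoop T stack
      = stack.any (fun f => thirteenRek (T.drop f.1) f.2.1 f.2.2) := by
  induction stack using thirteenLoop.induct (T := T) with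
  | case1 => simp [thirteenLoop]
  | case2 idx rem chosen rest hsucc =>
    rw [thirteenLoop]
    simp only [if_pos hsucc, List.any_cons]
    rw [thirteenRek.eq_def]
    simp [hsucc]
  | case3 idx rem chosen rest hsucc hguard ih =>
    rw [thirteenLoop]
    simp only [if_neg hsucc, if_pos hguard]
    rw [ih, List.any_cons]
    have hfalse : thirteenRek (T.drop idx) rem chosen = false := by
      rcases hguard with h | h
      · rw [List.drop_eq_nil_of_le h, thirteenRek, if_neg hsucc]
      · rw [thirteenRek.eq_def, if_neg hsucc]
        cases T.drop idx <;> simp [h]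
    simp [hfalse]
  | case4 idx rem chosen rest hsucc hguard ih =>
    rw [thirteenLoop]
    simp only [if_neg hsucc, if_neg hguard]
    simp only [dite_eq_ite] at ih
    rw [ih]
    have hlt : idx < T.length := by omega
    have hdrop : T.drop idx = T.getD idx (0, 0, 0, 0) :: T.drop (idx + 1) := by
      rw [List.getD_eq_getElem _ _ hlt, List.drop_eq_getElem_cons hlt]
    have hrek : thirteenRek (T.drop idx) rem chosen
        = (if (!chosen.any (fun k => nachodza (T.getD idx (0, 0, 0, 0)) k))
              && thirteenRek (T.drop (idx + 1)) (rem - pole (T.getD idx (0, 0, 0, 0))) (chosen ++ [T.getD idx (0, 0, 0, 0)]) then true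
           else thirteenRek (T.drop (idx + 1)) rem chosen) := by
      rw [hdrop, thirteenRek, if_neg hsucc]
      have h2 : ¬ (13 < chosen.length ∨ rem < 0) := fun h => hguard (Or.inr h)
      rw [if_neg h2]
    by_cases hc : (chosen.any fun k => nachodza (T.getD idx (0, 0, 0, 0)) k) = true
    · have hnc : (!chosen.any fun k => nachodza (T.getD idx (0, 0, 0, 0)) k) = false := by
        rw [hc]; decide
      rw [if_neg (by rw [hnc]; exact Bool.false_ne_true)]
      rw [hnc, Bool.false_and, if_neg Bool.false_ne_true] at hrek
      simp only [List.any_cons]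
      rw [hrek]
    · have hc' : (chosen.any fun k => nachodza (T.getD idx (0, 0, 0, 0)) k) = false :=
        Bool.eq_false_iff.mpr hc
      have hnc : (!chosen.any fun k => nachodza (T.getD idx (0, 0, 0, 0)) k) = true := by
        rw [hc']; decide
      rw [if_pos hnc]
      rw [hnc, Bool.true_and] at hrek
      simp only [List.any_cons]
      rw [hrek]
      cases thirteenRek (T.drop (idx + 1)) (rem - pole (T.getD idx (0, 0, 0, 0))) (chosen ++ [T.getD idx (0, 0, 0, 0)]) <;> simp

-- ===== VERDICT (by name: the statement is the Claim_ definition above) =====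
theorem thirteen_spec : Claim_equal_thirteen := by
  intro T _
  unfold Spec_thirteen thirteen thirteen_alt
  rw [thirteenLoop_eq_any]
  simp
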